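-- pv_equiv track=rewrite | github.com/mswastik/llm_ui | backend/tools/rag_service.py | chunk_text
-- ===== SOURCE A (Python) =====
-- from typing import List, Dict, Optional, Tuple
--
-- def chunk_text(
--     text: str,
--     chunk_size: int = 500,
--     overlap: int = 50
-- ) -> List[Tuple[str, int, int]]:
--     """
--     Split text into overlapping chunks.
--
--     Returns:
--         List of (chunk_text, start_char, end_char)
--     """
--     words = text.split()
--     chunks = []
--
--     if len(words) <= chunk_size:
--         return [(text, 0, len(text))]
--
--     start = 0
--     while start < len(words):
--         end = min(start + chunk_size, len(words))
--         chunk_words = words[start:end]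
--         chunk_text = " ".join(chunk_words)
--
--         # Calculate character positions
--         char_start = len(" ".join(words[:start])) + (1 if start > 0 else 0)
--         char_end = char_start + len(chunk_text)
--
--         chunks.append((chunk_text, char_start, char_end))
--
--         # Move start with overlap
--         start = end - overlap
--         if start >= len(words) - overlap:
--             break
--
--     return chunks
-- ===== SOURCE B (Python) =====
-- def chunk_text(
--     text: str,
--     chunk_size: int = 500,
--     overlap: int = 50
-- ):
--     """Staged pipeline: (1) one-pass prefix sums of word lengths, (2) collect the
--     list of chunk start indices, (3) map each start to its (chunk, start, end)
--     triple using O(1) prefix-sum lookups instead of re-joining the word prefix."""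
--     words = text.split()
--     n = len(words)
--     if n <= chunk_size:
--         return [(text, 0, len(text))]
--
--     # cum[k] = len(" ".join(words[:k]))
--     cum = [0]
--     total = 0
--     for i, w in enumerate(words):
--         total += len(w) + (1 if i > 0 else 0)
--         cum.append(total)
--
--     # stage 2: the start indices A's loop would visit (only an int is maintained)
--     starts = []
--     s = 0
--     while s < n:
--         starts.append(s)
--         s = min(s + chunk_size, n) - overlap
--         if s >= n - overlap:
--             break
--
--     # stage 3: one triple per start
--     def make(s):
--         e = min(s + chunk_size, n)
--         chunk = " ".join(words[s:e])
--         cs = cum[s] + (1 if s > 0 else 0)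
--         return (chunk, cs, cs + len(chunk))
--
--     return [make(s) for s in starts]
-- ===== Notes on version B (the rewrite author's own statement) =====
-- stated objective: alternative
-- what changed: B is a staged pipeline: it builds a prefix-sum table of word lengths once, then computes only the list of chunk start indices, then maps each start to its triple with O(1) offset lookups, instead of A's single while loop that re-joins words[:start] on every iteration.
import Mathlib
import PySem

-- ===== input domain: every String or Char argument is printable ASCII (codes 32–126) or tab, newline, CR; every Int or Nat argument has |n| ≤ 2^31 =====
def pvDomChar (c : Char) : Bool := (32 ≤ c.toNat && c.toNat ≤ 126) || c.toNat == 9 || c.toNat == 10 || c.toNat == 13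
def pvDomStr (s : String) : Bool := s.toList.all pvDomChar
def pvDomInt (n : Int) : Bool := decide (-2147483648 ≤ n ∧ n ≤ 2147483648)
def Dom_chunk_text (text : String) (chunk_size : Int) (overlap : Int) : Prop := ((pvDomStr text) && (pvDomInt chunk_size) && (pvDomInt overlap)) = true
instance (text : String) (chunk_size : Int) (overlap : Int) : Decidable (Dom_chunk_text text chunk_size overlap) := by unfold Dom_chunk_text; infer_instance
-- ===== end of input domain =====

-- B replaces A's single accumulating while loop by a staged pipeline (prefix-sum table,
-- then start-index list, then a map to triples); objective: alternative.

-- ===== PORT A =====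
-- the while loop of A; fuel bounds the iterations (under Pre_ the loop runs at most
-- words.length + 1 times, so the fuel given below is never exhausted)
def chunkLoopA (words : List String) (chunk_size overlap : Int) (fuel : Nat)
    (start : Int) (acc : List (String × Int × Int)) : List (String × Int × Int) :=
  match fuel with
  | 0 => acc
  | fuel + 1 =>
    if start < (words.length : Int) then
      let e := min (start + chunk_size) (words.length : Int)
      let ct := PySem.Str.join " " (PySem.List.slice words (some start) (some e))
      let charStart : Int :=
        PySem.Str.len (PySem.Str.join " " (PySem.List.slice words none (some start)))
          + (if 0 < start then 1 else 0)
      let charEnd : Int := charStart + PySem.Str.len ct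
      let acc' := acc ++ [(ct, charStart, charEnd)]
      let start' := e - overlap
      if (words.length : Int) - overlap ≤ start' then acc'
      else chunkLoopA words chunk_size overlap fuel start' acc'
    else acc

def chunk_text (text : String) (chunk_size : Int) (overlap : Int) : List (String × Int × Int) :=
  let words := PySem.Str.split₀ text
  if (words.length : Int) ≤ chunk_size then
    [(text, 0, PySem.Str.len text)]
  else
    chunkLoopA words chunk_size overlap (words.length + 2) 0 []

-- ===== PORT B =====
-- stage 1: prefix-sum table cum[k] = len(" ".join(words[:k])), one pass (Source B's for loop)
def chunkCum (words : List String) : List Int :=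
  ((PySem.List.enumerate words 0).foldl
    (fun (st : List Int × Int) p =>
      let total := st.2 + PySem.Str.len p.2 + (if 0 < p.1 then 1 else 0)
      (st.1 ++ [total], total))
    ([0], 0)).1

-- stage 2: the list of start indices (Source B's second while loop; only an Int is carried)
def chunkStarts (n chunk_size overlap : Int) (fuel : Nat) (s : Int) : List Int :=
  match fuel with
  | 0 => []
  | fuel + 1 =>
    if s < n then
      let s' := min (s + chunk_size) n - overlap
      if n - overlap ≤ s' then [s]
      else s :: chunkStarts n chunk_size overlap fuel s'
    else []

-- stage 3: Source B's `make`
def chunkMake (words : List String) (cum : List Int) (chunk_size : Int) (s : Int) :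
    String × Int × Int :=
  let e := min (s + chunk_size) (words.length : Int)
  let chunk := PySem.Str.join " " (PySem.List.slice words (some s) (some e))
  let cs := PySem.List.pyGetD cum s 0 + (if 0 < s then 1 else 0)
  (chunk, cs, cs + PySem.Str.len chunk)

def chunk_text_alt (text : String) (chunk_size : Int) (overlap : Int) : List (String × Int × Int) :=
  let words := PySem.Str.split₀ text
  if (words.length : Int) ≤ chunk_size then
    [(text, 0, PySem.Str.len text)]
  else
    (chunkStarts (words.length : Int) chunk_size overlap (words.length + 2) 0).map
      (chunkMake words (chunkCum words) chunk_size)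

-- ===== PRECONDITION & SPEC =====
-- Pre_ excludes exactly the inputs on which A never returns (infinite loop: more words
-- than chunk_size, at least one word, and the step chunk_size - overlap is ≤ 0).
def Pre_chunk_text (text : String) (chunk_size : Int) (overlap : Int) : Prop :=
  ((PySem.Str.split₀ text).length : Int) ≤ chunk_size ∨ overlap < chunk_size ∨ PySem.Str.split₀ text = []
instance (text : String) (chunk_size : Int) (overlap : Int) : Decidable (Pre_chunk_text text chunk_size overlap) := by unfold Pre_chunk_text; infer_instance

def pvWitness_chunk_text : String × Int × Int := ("alpha beta gamma delta", 2, 1)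

def Spec_chunk_text (text : String) (chunk_size : Int) (overlap : Int) (out : List (String × Int × Int)) : Prop := out = chunk_text_alt text chunk_size overlap
instance (text : String) (chunk_size : Int) (overlap : Int) (out : List (String × Int × Int)) : Decidable (Spec_chunk_text text chunk_size overlap out) := by unfold Spec_chunk_text; infer_instance

-- ===== CLAIM (what is proved, stated in full; the proofs are below) =====
def Claim_equal_chunk_text : Prop := ∀ (text : String) (chunk_size : Int) (overlap : Int), Dom_chunk_text text chunk_size overlap → Pre_chunk_text text chunk_size overlap → Spec_chunk_text text chunk_size overlap (chunk_text text chunk_size overlap)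

-- ===== LEMMAS AND PROOFS =====

-- length of " ".join(ws), as A computes it
def pvJL (ws : List String) : Int := PySem.Str.len (PySem.Str.join " " ws)

lemma pvJL_append (ws : List String) (w : String) :
    pvJL (ws ++ [w]) = pvJL ws + PySem.Str.len w + (if ws = [] then 0 else 1) := by
  induction ws with
  | nil => simp [pvJL, PySem.Str.len_eq, PySem.Str.toList_join, PySem.Chars.join_singleton,
      PySem.Chars.join_nil]
  | cons a t ih =>
    cases t with
    | nil =>
      simp [pvJL, PySem.Str.len_eq, PySem.Str.toList_join, PySem.Chars.join_singleton,
        PySem.Chars.join_cons_cons]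
      omega
    | cons b t' =>
      have h1 : pvJL (a :: (b :: t') ++ [w]) = PySem.Str.len a + 1 + pvJL ((b :: t') ++ [w]) := by
        simp [pvJL, PySem.Str.len_eq, PySem.Str.toList_join, PySem.Chars.join_cons_cons]
        omega
      have h2 : pvJL (a :: b :: t') = PySem.Str.len a + 1 + pvJL (b :: t') := by
        simp [pvJL, PySem.Str.len_eq, PySem.Str.toList_join, PySem.Chars.join_cons_cons]
        omega
      simp only [List.cons_append] at h1 ⊢
      rw [List.cons_append] at ih
      rw [h1, ih, h2]
      simp
      ring

lemma chunkCum_eq (words : List String) :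
    chunkCum words = (List.range (words.length + 1)).map (fun k => pvJL (words.take k)) := by
  suffices h : ∀ ws : List String,
      ((PySem.List.enumerate ws 0).foldl
        (fun (st : List Int × Int) p =>
          let total := st.2 + PySem.Str.len p.2 + (if 0 < p.1 then 1 else 0)
          (st.1 ++ [total], total))
        ([0], 0)) =
      ((List.range (ws.length + 1)).map (fun k => pvJL (ws.take k)), pvJL ws) by
    unfold chunkCum; rw [h]
  intro ws
  induction ws using List.reverseRecOn with
  | nil => simp [PySem.List.enumerate, pvJL, PySem.Str.len_eq, PySem.Str.toList_join,
      PySem.Chars.join_nil]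
  | append_singleton ws w ih =>
    rw [PySem.List.enumerate_append, List.foldl_append, ih]
    have he : PySem.List.enumerate [w] (0 + (ws.length : Int)) = [((ws.length : Int), w)] := by
      simp [PySem.List.enumerate]
    rw [he]
    simp only [List.foldl_cons, List.foldl_nil]
    have hpad : (if 0 < (ws.length : Int) then (1 : Int) else 0) = (if ws = [] then 0 else 1) := by
      rcases ws with _ | _ <;> simp
    have hfst : List.map (fun k => pvJL (ws.take k)) (List.range (ws.length + 1)) ++ [pvJL (ws ++ [w])]
        = List.map (fun k => pvJL ((ws ++ [w]).take k)) (List.range ((ws ++ [w]).length + 1)) := by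
      rw [List.length_append, List.length_singleton]
      rw [show List.range (ws.length + 1 + 1) = List.range (ws.length + 1) ++ [ws.length + 1] from List.range_succ, List.map_append]
      congr 1
      · apply List.map_congr_left
        intro k hk
        simp only [List.mem_range] at hk
        rw [List.take_append_of_le_length (by omega)]
      · simp [List.take_of_length_le]
    rw [hpad, ← pvJL_append ws w, hfst]

lemma chunkCum_get (words : List String) (i : Int) (h0 : 0 ≤ i) (h1 : i ≤ (words.length : Int)) :
    PySem.List.pyGetD (chunkCum words) i 0 = pvJL (words.take i.toNat) := by
  rw [chunkCum_eq, PySem.List.pyGetD_of_nonneg _ _ h0]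
  rw [List.getD_eq_getElem?_getD]
  rw [List.getElem?_map]
  have hlt : i.toNat < (List.range (words.length + 1)).length := by
    simp; omega
  rw [List.getElem?_eq_getElem hlt]
  simp

-- A's accumulator loop equals acc ++ the map over B's start list
lemma loop_eq (words : List String) (chunk_size overlap : Int) (h : overlap < chunk_size) :
    ∀ (fuel : Nat) (start : Int) (acc : List (String × Int × Int)), 0 ≤ start →
      chunkLoopA words chunk_size overlap fuel start acc
        = acc ++ (chunkStarts (words.length : Int) chunk_size overlap fuel start).map
            (chunkMake words (chunkCum words) chunk_size) := by
  intro fuel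
  induction fuel with
  | zero => intro start acc _; simp [chunkLoopA, chunkStarts]
  | succ fuel ih =>
    intro start acc h0
    unfold chunkLoopA chunkStarts
    by_cases hs : start < (words.length : Int)
    · simp only [hs, if_true]
      have hcs : PySem.List.pyGetD (chunkCum words) start 0
          = PySem.Str.len (PySem.Str.join " " (PySem.List.slice words none (some start))) := by
        rw [chunkCum_get words start h0 (le_of_lt hs), PySem.List.slice_to words h0]
        rfl
      by_cases hb : (words.length : Int) - overlap ≤ min (start + chunk_size) (words.length : Int) - overlap
      · simp only [hb, if_true]
        simp [chunkMake, hcs]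
      · simp only [hb, if_false]
        rw [ih]
        · simp [chunkMake, hcs]
        · have : min (start + chunk_size) (words.length : Int) = start + chunk_size := by omega
          omega
    · simp only [hs, if_false]
      simp

-- ===== VERDICT (by name: the statement is the Claim_ definition above) =====
theorem chunk_text_spec : Claim_equal_chunk_text := by
  intro text chunk_size overlap _ hpre
  unfold Spec_chunk_text chunk_text chunk_text_alt
  by_cases hle : ((PySem.Str.split₀ text).length : Int) ≤ chunk_size
  · simp only [hle, if_true]
  · simp only [hle, if_false]
    rcases hpre with h | h | h
    · exact absurd h hle
    · rw [loop_eq _ _ _ h _ 0 [] le_rfl]; simp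
    · rw [h]
      unfold chunkLoopA chunkStarts
      simp
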